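-- pv_equiv track=rewrite | github.com/Polete25/Python | Python 100Ex/Ej67.py | claveMaxValDicc
-- ===== SOURCE A (Python) =====
-- def claveMaxValDicc(d):
--     max = ''
--     max_uni = 0
--     for K1,L1 in d.items():
--         unic = 0
--         for l in L1:
--             if L1.count(l) == 1:
--                 unic += 1
--         if unic > max_uni:
--             max = K1
--             max_uni = unic
--
--     return max
-- ===== SOURCE B (Python) =====
-- def claveMaxValDicc(d):
--     best = ''
--     best_uni = 0
--     for k, L in d.items():
--         s = sorted(L)
--         uni = 0
--         if s:
--             cur = s[0]
--             lone = True
--             for y in s[1:]: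
--                 if y == cur:
--                     lone = False
--                 else:
--                     if lone:
--                         uni += 1
--                     cur = y
--                     lone = True
--             if lone:
--                 uni += 1
--         if uni > best_uni:
--             best = k
--             best_uni = uni
--     return best
-- ===== Notes on version B (the rewrite author's own statement) =====
-- stated objective: alternative
-- what changed: B sorts each list and counts runs of length 1 in a single neighbor-comparing scan (an element is unique iff its sorted run has length 1), instead of A's inner pass calling L.count(l) for every element; the outer strict-'>' scan is unchanged.
import Mathlib
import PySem

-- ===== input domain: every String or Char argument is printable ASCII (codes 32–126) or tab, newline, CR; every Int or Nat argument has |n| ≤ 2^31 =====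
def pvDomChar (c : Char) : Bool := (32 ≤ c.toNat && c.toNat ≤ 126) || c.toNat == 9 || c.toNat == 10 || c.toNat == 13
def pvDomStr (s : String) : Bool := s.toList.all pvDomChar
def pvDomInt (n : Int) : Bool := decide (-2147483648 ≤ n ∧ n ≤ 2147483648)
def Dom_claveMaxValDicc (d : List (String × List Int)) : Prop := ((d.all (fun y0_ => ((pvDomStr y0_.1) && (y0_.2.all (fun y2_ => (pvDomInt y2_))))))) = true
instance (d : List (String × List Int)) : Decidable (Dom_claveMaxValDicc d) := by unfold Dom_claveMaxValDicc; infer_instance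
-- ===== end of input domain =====

-- B sorts each list and counts runs of length 1 in one neighbor-comparing scan, instead of A's per-element count pass.

-- ===== PORT A =====
def claveMaxValDicc (d : List (String × List Int)) : String :=
  (d.foldl
    (fun (st : String × Int) kv =>
      let unic : Int := kv.2.foldl (fun u l => if kv.2.count l == 1 then u + 1 else u) 0
      if st.2 < unic then (kv.1, unic) else st)
    ("", 0)).1

-- ===== PORT B =====
-- the inner for-loop over s[1:]: cur is the current run's value, lone = "run so far has length 1";
-- close the last run after the loop (the trailing 'if lone: uni += 1')
def pvScan (cur : Int) (lone : Bool) : List Int → Int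
  | [] => if lone then 1 else 0
  | y :: ys => if y == cur then pvScan cur false ys
               else (if lone then 1 else 0) + pvScan y true ys

-- uni for one list: sort, then scan runs
def pvUniScore (L : List Int) : Int :=
  match PySem.List.sorted L (fun x => x) false with
  | [] => 0
  | x :: rest => pvScan x true rest

def claveMaxValDicc_alt (d : List (String × List Int)) : String :=
  (d.foldl
    (fun (st : String × Int) kv =>
      if st.2 < pvUniScore kv.2 then (kv.1, pvUniScore kv.2) else st)
    ("", 0)).1

-- ===== PRECONDITION & SPEC =====
def Spec_claveMaxValDicc (d : List (String × List Int)) (out : String) : Prop := out = claveMaxValDicc_alt d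
instance (d : List (String × List Int)) (out : String) : Decidable (Spec_claveMaxValDicc d out) := by unfold Spec_claveMaxValDicc; infer_instance

-- ===== CLAIM (what is proved, stated in full; the proofs are below) =====
def Claim_equal_claveMaxValDicc : Prop := ∀ (d : List (String × List Int)), Dom_claveMaxValDicc d → Spec_claveMaxValDicc d (claveMaxValDicc d)

-- ===== LEMMAS AND PROOFS =====

-- after a duplicate of cur was seen (lone=false), the rest of the current run contributes 0:
-- the scan restarts at the head of dropWhile (· == cur)
lemma pvScan_false (cur : Int) (ys : List Int) :
    pvScan cur false ys =
      match ys.dropWhile (· == cur) with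
      | [] => 0
      | z :: zs => pvScan z true zs := by
  induction ys with
  | nil => simp [pvScan]
  | cons y ys ih =>
    by_cases h : y = cur
    · simp [pvScan, h, ih]
    · simp [pvScan, h]

-- run decomposition of the scan: the run of cur contributes 1 iff it has length 1
lemma pvScan_true (cur : Int) (xs : List Int) :
    pvScan cur true xs =
      (if xs.takeWhile (· == cur) = [] then 1 else 0) +
      (match xs.dropWhile (· == cur) with
       | [] => (0 : Int)
       | z :: zs => pvScan z true zs) := by
  cases xs with
  | nil => simp [pvScan]
  | cons y ys =>
    by_cases h : y = cur
    · simp [pvScan, h, pvScan_false]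
    · simp [pvScan, h]

-- counting the once-occurring elements of x :: (t ++ r), where t is all x and r avoids x:
-- the first run contributes 1 iff t = [], and r is independent
lemma countP_split (x : Int) (t r : List Int)
    (htx : ∀ y ∈ t, y = x) (hrne : ∀ y ∈ r, y ≠ x) :
    (x :: (t ++ r)).countP (fun l => (x :: (t ++ r)).count l == 1)
      = (if t = [] then 1 else 0) + r.countP (fun l => r.count l == 1) := by
  have hcx : (x :: (t ++ r)).count x = 1 + t.length := by
    have h1 : t.count x = t.length := List.count_eq_length.mpr (fun b hb => (htx b hb).symm)
    have h2 : r.count x = 0 := List.count_eq_zero.mpr (fun h => hrne x h rfl)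
    simp [List.count_append, h1, h2]; omega
  have hcl : ∀ l ∈ r, (x :: (t ++ r)).count l = r.count l := by
    intro l hl
    have hlx : l ≠ x := hrne l hl
    have h1 : t.count l = 0 := List.count_eq_zero.mpr (fun h => hlx (htx l h))
    simp [List.count_append, h1, Ne.symm hlx]
  have hpr : r.countP (fun l => (x :: (t ++ r)).count l == 1)
      = r.countP (fun l => r.count l == 1) :=
    List.countP_congr (fun l hl => by rw [hcl l hl])
  rw [List.countP_cons, List.countP_append, hpr]
  by_cases ht0 : t = []
  · subst ht0
    have h2 : r.count x = 0 := List.count_eq_zero.mpr (fun h => hrne x h rfl)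
    simp [h2]; omega
  · have hpx : ((x :: (t ++ r)).count x == 1) = false := by
      have : t.length ≠ 0 := fun h => ht0 (List.eq_nil_of_length_eq_zero h)
      simp [hcx]; omega
    have hpt : t.countP (fun l => (x :: (t ++ r)).count l == 1) = 0 :=
      List.countP_eq_zero.mpr (fun a ha => by rw [htx a ha]; rw [hpx]; simp)
    have h1 : t.count x = t.length := List.count_eq_length.mpr (fun b hb => (htx b hb).symm)
    simp [hpt, ht0]
    intro h
    exact absurd (List.eq_nil_of_length_eq_zero (by omega)) ht0

-- on a sorted (Pairwise ≤) list, the run scan counts exactly the elements occurring once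
lemma scan_countP : ∀ (n : Nat) (s : List Int), s.length ≤ n → s.Pairwise (· ≤ ·) →
    (match s with | [] => (0 : Int) | x :: xs => pvScan x true xs) =
      (s.countP (fun l => s.count l == 1) : Int) := by
  intro n
  induction n with
  | zero =>
    intro s hn _
    have : s = [] := List.eq_nil_of_length_eq_zero (Nat.le_zero.mp hn)
    subst this; simp
  | succ n ih =>
    intro s hn hsort
    cases s with
    | nil => simp
    | cons x xs =>
      have htx : ∀ y ∈ xs.takeWhile (· == x), y = x := by
        intro y hy; simpa using List.mem_takeWhile_imp hy
      have hxle : ∀ y ∈ xs, x ≤ y := (List.pairwise_cons.mp hsort).1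
      have hxsort : xs.Pairwise (· ≤ ·) := (List.pairwise_cons.mp hsort).2
      have hrsort : (xs.dropWhile (· == x)).Pairwise (· ≤ ·) :=
        hxsort.sublist (List.dropWhile_sublist _)
      -- every element of the remainder differs from x (sortedness: the head of the
      -- remainder is > x and later elements are ≥ it)
      have hrne : ∀ y ∈ xs.dropWhile (· == x), y ≠ x := by
        intro y hy h
        cases hrr : xs.dropWhile (· == x) with
        | nil => rw [hrr] at hy; simp at hy
        | cons z zs =>
          have hz : ¬ (z == x) = true := by
            have := List.head_dropWhile_not (fun y => y == x)
              (l := xs) (by simp [hrr] : xs.dropWhile (· == x) ≠ [])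
            simpa [hrr] using this
          have hzx : z ≠ x := by simpa using hz
          have hzmem : z ∈ xs.dropWhile (· == x) := by rw [hrr]; simp
          have hxz : x ≤ z := hxle z ((List.dropWhile_sublist _).subset hzmem)
          have hzy : z ≤ y := by
            rw [hrr] at hy
            rcases List.mem_cons.mp hy with h1 | h1
            · exact le_of_eq h1.symm
            · exact (List.pairwise_cons.mp (by rw [hrr] at hrsort; exact hrsort)).1 y h1
          exact hzx (le_antisymm (h ▸ hzy) hxz)
      have hxs : xs = xs.takeWhile (· == x) ++ xs.dropWhile (· == x) :=
        (List.takeWhile_append_dropWhile).symm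
      have hrlen : (xs.dropWhile (· == x)).length ≤ n := by
        have h1 : (xs.dropWhile (· == x)).length ≤ xs.length := List.length_dropWhile_le _ _
        have h2 : (x :: xs).length ≤ n + 1 := hn
        simp at h2; omega
      have IH := ih (xs.dropWhile (· == x)) hrlen hrsort
      show pvScan x true xs =
        ((x :: xs).countP (fun l => (x :: xs).count l == 1) : Int)
      rw [pvScan_true]
      conv_rhs => rw [hxs]
      rw [countP_split x _ _ htx hrne]
      push_cast
      cases hrr : xs.dropWhile (· == x) with
      | nil => simp
      | cons z zs =>
        rw [hrr] at IH
        have IH' : pvScan z true zs =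
            ((z :: zs).countP (fun l => (z :: zs).count l == 1) : Int) := IH
        exact congrArg ((if xs.takeWhile (· == x) = [] then (1 : Int) else 0) + ·) IH'

-- A's inner loop equals B's sort-and-scan score
lemma score_eq (L : List Int) :
    (L.foldl (fun (u : Int) l => if L.count l == 1 then u + 1 else u) 0) = pvUniScore L := by
  rw [PySem.List.foldl_if_add_one]
  unfold pvUniScore
  have hperm : (PySem.List.sorted L (fun x => x) false).Perm L := PySem.List.sorted_perm L _ _
  have hsort : (PySem.List.sorted L (fun x => x) false).Pairwise (· ≤ ·) := by
    have := PySem.List.sorted_pairwise (xs := L) (key := fun x => x)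
    simpa using this
  have h1 : L.countP (fun l => L.count l == 1)
      = (PySem.List.sorted L (fun x => x) false).countP
          (fun l => (PySem.List.sorted L (fun x => x) false).count l == 1) := by
    rw [← hperm.countP_eq]
    exact List.countP_congr (fun l _ => by rw [hperm.count_eq])
  rw [h1, ← scan_countP (PySem.List.sorted L (fun x => x) false).length _ (le_refl _) hsort]
  simp

-- ===== VERDICT (by name: the statement is the Claim_ definition above) =====
theorem claveMaxValDicc_spec : Claim_equal_claveMaxValDicc := by
  intro d _
  unfold Spec_claveMaxValDicc claveMaxValDicc claveMaxValDicc_alt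
  simp only [score_eq]
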